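-- pv_equiv track=rewrite | github.com/maximsmajda/skyscrapper_puzzle_solver | main.py | count_visible_top
-- ===== SOURCE A (Python) =====
-- def count_visible_top(board, column):
--     visible_count = 0
--     visible_max = 0
--     for y in range(len(board)):
--         if board[y][column] > visible_max:
--             visible_max = board[y][column]
--             visible_count += 1
--     return visible_count
-- ===== SOURCE B (Python) =====
-- def count_visible_top(board, column):
--     col = [row[column] for row in board]
--     return sum(1 for i in range(len(col))
--                if col[i] > 0 and all(w < col[i] for w in col[:i]))
-- ===== Notes on version B (the rewrite author's own statement) =====
-- stated objective: alternative
-- what changed: Replaces the running-max/counter single pass with a per-position visibility test: extract the column, then count the indices whose value is positive and strictly greater than every earlier value in the column.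
import Mathlib
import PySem

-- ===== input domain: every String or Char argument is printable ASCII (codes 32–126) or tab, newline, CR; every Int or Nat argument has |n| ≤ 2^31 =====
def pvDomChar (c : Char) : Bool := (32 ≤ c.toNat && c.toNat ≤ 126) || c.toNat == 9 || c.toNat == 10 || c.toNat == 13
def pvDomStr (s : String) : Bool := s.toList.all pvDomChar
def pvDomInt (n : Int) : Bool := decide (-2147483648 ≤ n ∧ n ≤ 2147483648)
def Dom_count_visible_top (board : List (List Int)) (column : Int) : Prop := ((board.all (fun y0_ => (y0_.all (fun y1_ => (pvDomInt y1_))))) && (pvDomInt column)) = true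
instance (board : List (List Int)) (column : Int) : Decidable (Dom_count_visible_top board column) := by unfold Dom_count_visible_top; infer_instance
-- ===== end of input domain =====

-- B replaces A's running-max/counter pass by a per-position test (count positions whose value
-- beats every earlier column value and 0); alternative decomposition, not faster.

-- ===== PORT A =====
-- literal port: the loop over y keeps (visible_count, visible_max); board[y][column] is
-- pyGetD (Pre_ guarantees the index is in range, so the default is never used)
def count_visible_top (board : List (List Int)) (column : Int) : Int :=
  (board.foldl
    (fun (st : Int × Int) row =>
      if st.2 < PySem.List.pyGetD row column 0 then
        (st.1 + 1, PySem.List.pyGetD row column 0)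
      else st)
    (0, 0)).1

-- ===== PORT B =====
-- literal port of Source B: col = [row[column] for row in board]; count i with col[i] > 0
-- and all earlier entries < col[i]
def count_visible_top_alt (board : List (List Int)) (column : Int) : Int :=
  let col := board.map (fun row => PySem.List.pyGetD row column 0)
  ((List.range col.length).filter
      (fun i => decide (0 < col.getD i 0) && (col.take i).all (fun w => decide (w < col.getD i 0)))).length

-- ===== PRECONDITION & SPEC =====
-- Pre_ excludes exactly the inputs on which A raises IndexError: a column index out of
-- range (after Python's negative-index rule) for some row.
def Pre_count_visible_top (board : List (List Int)) (column : Int) : Prop :=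
  ∀ row ∈ board, PySem.Raise.InRange row.length column
instance (board : List (List Int)) (column : Int) : Decidable (Pre_count_visible_top board column) := by unfold Pre_count_visible_top; infer_instance
def pvWitness_count_visible_top : List (List Int) × Int := ([[2, 1], [1, 3], [4, 0]], 0)

def Spec_count_visible_top (board : List (List Int)) (column : Int) (out : Int) : Prop := out = count_visible_top_alt board column
instance (board : List (List Int)) (column : Int) (out : Int) : Decidable (Spec_count_visible_top board column out) := by unfold Spec_count_visible_top; infer_instance

-- ===== CLAIM (what is proved, stated in full; the proofs are below) =====
def Claim_equal_count_visible_top : Prop := ∀ (board : List (List Int)) (column : Int), Dom_count_visible_top board column → Pre_count_visible_top board column → Spec_count_visible_top board column (count_visible_top board column)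

-- ===== LEMMAS AND PROOFS =====

-- reference: number of strict records above threshold m in a list
def recs (m : Int) : List Int → Int
  | [] => 0
  | v :: t => if m < v then 1 + recs v t else recs m t

-- generalisation of B's count: threshold m instead of 0
def gCount (m : Int) (col : List Int) : Int :=
  ((List.range col.length).filter
      (fun i => decide (m < col.getD i 0) && (col.take i).all (fun w => decide (w < col.getD i 0)))).length

lemma foldlA_recs (col : List Int) : ∀ (c m : Int),
    (col.foldl (fun (st : Int × Int) v => if st.2 < v then (st.1 + 1, v) else st) (c, m)).1
      = c + recs m col := by
  induction col with
  | nil => intro c m; simp [recs]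
  | cons v t ih =>
    intro c m
    simp only [List.foldl_cons, recs]
    by_cases h : m < v
    · simp only [if_pos h, ih]; ring
    · simp only [if_neg h, ih]

lemma gCount_cons (m v : Int) (t : List Int) :
    gCount m (v :: t) = (if m < v then 1 else 0) + gCount (max m v) t := by
  unfold gCount
  simp only [List.length_cons, List.range_succ_eq_map, List.filter_cons, List.filter_map,
    List.getD_cons_zero, List.take_zero, List.all_nil, Bool.and_true, List.getD_cons_succ,
    List.take_succ_cons, List.all_cons, Function.comp_def]
  have hcong : ∀ i ∈ List.range t.length,
      (decide (m < t.getD i 0) && (decide (v < t.getD i 0) && (t.take i).all (fun w => decide (w < t.getD i 0))))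
        = (decide (max m v < t.getD i 0) && (t.take i).all (fun w => decide (w < t.getD i 0))) := by
    intro i _
    have hx : decide (max m v < t.getD i 0) = (decide (m < t.getD i 0) && decide (v < t.getD i 0)) := by
      simp
    rw [hx, Bool.and_assoc]
  rw [List.filter_congr hcong]
  by_cases h : m < v
  · simp [h]; omega
  · simp [h]

lemma gCount_recs (col : List Int) : ∀ m : Int, gCount m col = recs m col := by
  induction col with
  | nil => intro m; simp [gCount, recs]
  | cons v t ih =>
    intro m
    rw [gCount_cons, recs]
    by_cases h : m < v
    · rw [if_pos h, if_pos h, max_eq_right (le_of_lt h), ih]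
    · rw [if_neg h, if_neg h, max_eq_left (le_of_not_gt h), ih]; ring

-- ===== VERDICT (by name: the statement is the Claim_ definition above) =====
theorem count_visible_top_spec : Claim_equal_count_visible_top := by
  intro board column _ _
  unfold Spec_count_visible_top count_visible_top count_visible_top_alt
  rw [show ((List.range (board.map (fun row => PySem.List.pyGetD row column 0)).length).filter _).length
      = gCount 0 (board.map (fun row => PySem.List.pyGetD row column 0)) from rfl]
  rw [gCount_recs]
  rw [show (board.foldl (fun (st : Int × Int) row =>
      if st.2 < PySem.List.pyGetD row column 0 then (st.1 + 1, PySem.List.pyGetD row column 0) else st) (0, 0))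
    = ((board.map (fun row => PySem.List.pyGetD row column 0)).foldl
        (fun (st : Int × Int) v => if st.2 < v then (st.1 + 1, v) else st) (0, 0)) from by
      rw [List.foldl_map]]
  rw [foldlA_recs]
  simp
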